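-- pv_equiv track=rewrite | github.com/yhde-oliveira-falcao/Python | AlgoStudy/matrixElementSum.py | solution
-- ===== SOURCE A (Python) =====
-- def solution(matrix):
--     total = 0
--     rows = len(matrix)
--     cols = len(matrix[0])
--
--     for col in range(cols):
--         for row in range(rows):
--             if matrix[row][col] == 0:
--                 break  # stop counting in this column
--             total += matrix[row][col]
--
--     return total
-- ===== SOURCE B (Python) =====
-- def solution(matrix):
--     cols = len(matrix[0])  # empty matrix raises IndexError, as in the original
--     alive = list(range(cols))  # columns still accumulating
--     total = 0
--     for row in matrix:
--         alive = [c for c in alive if row[c] != 0]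
--         total += sum(row[c] for c in alive)
--     return total
-- ===== Notes on version B (the rewrite author's own statement) =====
-- stated objective: alternative
-- what changed: B makes a single row-major pass maintaining a shrinking worklist of still-alive columns (a column is removed when its first zero is seen), instead of A's column-major nested index loops with break.
import Mathlib
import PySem

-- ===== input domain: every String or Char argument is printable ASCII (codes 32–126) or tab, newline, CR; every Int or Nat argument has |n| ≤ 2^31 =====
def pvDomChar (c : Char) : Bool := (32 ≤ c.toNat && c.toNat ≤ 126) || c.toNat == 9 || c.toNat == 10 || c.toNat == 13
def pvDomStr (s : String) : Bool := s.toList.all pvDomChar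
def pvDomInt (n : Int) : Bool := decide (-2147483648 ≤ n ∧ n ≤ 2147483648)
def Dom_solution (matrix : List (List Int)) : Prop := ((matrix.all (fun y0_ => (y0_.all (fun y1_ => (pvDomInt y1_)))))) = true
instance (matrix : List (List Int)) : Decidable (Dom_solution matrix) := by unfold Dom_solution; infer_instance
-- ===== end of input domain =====

-- B replaces A's column-major nested index loops with a single row-major pass that
-- keeps a shrinking worklist of still-alive columns. Return value only; no mutation.

-- ===== PORT A =====
-- inner loop: 'for row in range(rows): if matrix[row][col] == 0: break; total += matrix[row][col]'
def solutionInner (matrix : List (List Int)) (col : Int) : List Int → Int → Int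
  | [], total => total
  | r :: rs, total =>
    if PySem.List.pyGetD (PySem.List.pyGetD matrix r []) col 0 = 0 then total
    else solutionInner matrix col rs (total + PySem.List.pyGetD (PySem.List.pyGetD matrix r []) col 0)

def solution (matrix : List (List Int)) : Int :=
  let rows : Int := matrix.length
  let cols : Int := ((PySem.List.pyGet? matrix 0).getD []).length
  (PySem.List.pyRange 0 cols 1).foldl
    (fun total col => solutionInner matrix col (PySem.List.pyRange 0 rows 1) total) 0

-- ===== PORT B =====
-- one row step: 'alive = [c for c in alive if row[c] != 0]; total += sum(row[c] for c in alive)'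
-- (row[c] is ported as pyGetD row c 0; inside Pre_ every such access is in range, as in Python)
def solutionAltStep (st : List Int × Int) (row : List Int) : List Int × Int :=
  let alive := st.1.filter (fun c => PySem.List.pyGetD row c 0 ≠ 0)
  (alive, st.2 + (alive.map (fun c => PySem.List.pyGetD row c 0)).sum)

def solution_alt (matrix : List (List Int)) : Int :=
  let cols : Int := ((PySem.List.pyGet? matrix 0).getD []).length
  (matrix.foldl solutionAltStep (PySem.List.pyRange 0 cols 1, 0)).2

-- ===== PRECONDITION & SPEC =====
-- Pre_ is exactly the set of inputs on which Python A returns: the matrix is nonempty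
-- (A raises IndexError on len(matrix[0])), and whenever a row i is too short for a
-- column c < len(matrix[0]), some earlier row stops column c with a zero before A
-- would index matrix[i][c] (otherwise A raises IndexError there).
def Pre_solution (matrix : List (List Int)) : Prop :=
  matrix ≠ [] ∧
  ∀ i < matrix.length, ∀ c < (matrix.headD []).length,
    (matrix.getD i []).length ≤ c →
      ∃ j < i, c < (matrix.getD j []).length ∧ (matrix.getD j []).getD c 1 = 0
instance (matrix : List (List Int)) : Decidable (Pre_solution matrix) := by
  unfold Pre_solution; infer_instance

def pvWitness_solution : List (List Int) := [[1, 2], [3, 4]]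

def Spec_solution (matrix : List (List Int)) (out : Int) : Prop := out = solution_alt matrix
instance (matrix : List (List Int)) (out : Int) : Decidable (Spec_solution matrix out) := by unfold Spec_solution; infer_instance

-- ===== CLAIM (what is proved, stated in full; the proofs are below) =====
def Claim_equal_solution : Prop := ∀ (matrix : List (List Int)), Dom_solution matrix → Pre_solution matrix → Spec_solution matrix (solution matrix)

-- ===== LEMMAS AND PROOFS =====

-- per-column value both sides compute: sum of the prefix before the first zero
def tws (l : List Int) : Int := (l.takeWhile (fun v => v ≠ 0)).sum

-- sum over the columns cs of the prefix-sums of matrix m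
def colsum (m : List (List Int)) (cs : List Int) : Int :=
  (cs.map (fun c => tws (m.map (fun row => PySem.List.pyGetD row c 0)))).sum

lemma sum_map_ite (p : Int → Bool) (f : Int → Int) (cs : List Int) :
    (cs.map (fun c => if p c then f c else 0)).sum = ((cs.filter p).map f).sum := by
  induction cs with
  | nil => simp
  | cons c cs ih => by_cases h : p c <;> simp [h, ih]

lemma colsum_cons (row : List Int) (m : List (List Int)) (cs : List Int) :
    colsum (row :: m) cs
      = ((cs.filter (fun c => PySem.List.pyGetD row c 0 ≠ 0)).map
           (fun c => PySem.List.pyGetD row c 0)).sum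
        + colsum m (cs.filter (fun c => PySem.List.pyGetD row c 0 ≠ 0)) := by
  unfold colsum
  have hpt : ∀ c : Int,
      tws (((row :: m).map (fun r => PySem.List.pyGetD r c 0)))
        = (if (PySem.List.pyGetD row c 0 ≠ 0 : Bool) then
             PySem.List.pyGetD row c 0 + tws (m.map (fun r => PySem.List.pyGetD r c 0))
           else 0) := by
    intro c
    by_cases h : PySem.List.pyGetD row c 0 = 0 <;> simp [tws, h]
  calc (cs.map (fun c => tws ((row :: m).map (fun r => PySem.List.pyGetD r c 0)))).sum
      = (cs.map (fun c => if (PySem.List.pyGetD row c 0 ≠ 0 : Bool) then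
             PySem.List.pyGetD row c 0 + tws (m.map (fun r => PySem.List.pyGetD r c 0))
           else 0)).sum := by
        exact congrArg List.sum (List.map_congr_left (fun c _ => hpt c))
    _ = ((cs.filter (fun c => PySem.List.pyGetD row c 0 ≠ 0)).map
           (fun c => PySem.List.pyGetD row c 0 + tws (m.map (fun r => PySem.List.pyGetD r c 0)))).sum := by
        exact sum_map_ite _ _ cs
    _ = _ := by
        rw [PySem.List.sum_map_add_int]

lemma foldl_alt (m : List (List Int)) :
    ∀ (cs : List Int) (acc : Int),
      (m.foldl solutionAltStep (cs, acc)).2 = acc + colsum m cs := by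
  induction m with
  | nil => intro cs acc; simp [colsum, tws]
  | cons row m ih =>
    intro cs acc
    simp only [List.foldl_cons, solutionAltStep]
    rw [ih, colsum_cons]
    ring

lemma solutionInner_eq (matrix : List (List Int)) (col : Int) (idxs : List Int) (total : Int) :
    solutionInner matrix col idxs total
      = total + tws (idxs.map (fun r => PySem.List.pyGetD (PySem.List.pyGetD matrix r []) col 0)) := by
  induction idxs generalizing total with
  | nil => simp [solutionInner, tws]
  | cons r rs ih =>
    rw [solutionInner]
    by_cases h : PySem.List.pyGetD (PySem.List.pyGetD matrix r []) col 0 = 0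
    · simp [h, tws]
    · rw [if_neg h, ih]
      simp [tws, h]
      ring

lemma solutionInner_range_eq (matrix : List (List Int)) (col : Int) (total : Int) :
    solutionInner matrix col (PySem.List.pyRange 0 (matrix.length : Int) 1) total
      = total + tws (matrix.map (fun row => PySem.List.pyGetD row col 0)) := by
  rw [solutionInner_eq]
  congr 2
  have : (PySem.List.pyRange 0 (matrix.length : Int) 1).map
        (fun r => PySem.List.pyGetD (PySem.List.pyGetD matrix r []) col 0)
      = ((PySem.List.pyRange 0 (matrix.length : Int) 1).map
        (fun r => PySem.List.pyGetD matrix r [])).map (fun row => PySem.List.pyGetD row col 0) := by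
    rw [List.map_map]; rfl
  rw [this]
  congr 1
  have := PySem.List.map_pyGetD_pyRange_zero matrix ([] : List Int)
  simpa [PySem.List.len] using this

-- both ports compute colsum matrix (pyRange 0 cols 1); this holds for every matrix
lemma ports_eq (matrix : List (List Int)) : solution matrix = solution_alt matrix := by
  unfold solution solution_alt
  dsimp only
  rw [foldl_alt]
  have ha : (fun (total : Int) (col : Int) =>
      solutionInner matrix col (PySem.List.pyRange 0 (matrix.length : Int) 1) total)
      = fun total col => total + tws (matrix.map (fun row => PySem.List.pyGetD row col 0)) := by
    funext total col
    rw [solutionInner_range_eq]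
  rw [ha, PySem.List.foldl_add]
  simp [colsum]

-- ===== VERDICT (by name: the statement is the Claim_ definition above) =====
theorem solution_spec : Claim_equal_solution := by
  intro matrix _hdom _hpre
  unfold Spec_solution
  exact ports_eq matrix
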